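-- pv_equiv track=rewrite | github.com/sakeermr/TrackMyPDB | backend/nl_interface.py | extract_all_heteroatoms_optimized
-- ===== SOURCE A (Python) =====
-- def extract_all_heteroatoms_optimized(lines):
--     """Extract ALL unique heteroatom codes from HETATM lines - OPTIMIZED."""
--     hets = set()
--     het_details = {}
--
--     # Process lines more efficiently
--     hetatm_lines = [line for line in lines if line.startswith("HETATM")]
--
--     for line in hetatm_lines:
--         try:
--             # Exclude water and common heteroatoms for speed
--             if "HOH" in line or "WAT" in line:
--                 continue
--
--             # Extract residue name (columns 18-20, 1-indexed -> 17-20 in 0-indexed)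
--             code = line[17:20].strip()
--             if not code:
--                 continue
--
--             hets.add(code)
--
--             # Extract additional info for context
--             chain = line[21:22].strip()
--             res_num = line[22:26].strip()
--             atom_name = line[12:16].strip()
--
--             if code not in het_details:
--                 het_details[code] = {
--                     'chains': set([chain]) if chain else set(),
--                     'residue_numbers': set([res_num]) if res_num else set(),
--                     'atom_names': set([atom_name]) if atom_name else set()
--                 }
--             else:
--                 if chain:
--                     het_details[code]['chains'].add(chain)
--                 if res_num:
--                     het_details[code]['residue_numbers'].add(res_num)
--                 if atom_name:
--                     het_details[code]['atom_names'].add(atom_name)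
--         except (IndexError, AttributeError):
--             continue
--
--     return sorted(list(hets)), het_details
-- ===== SOURCE B (Python) =====
-- def extract_all_heteroatoms_optimized(lines):
--     """Two-pass: group parsed HETATM records by code, then aggregate the field sets."""
--     groups = {}
--     for line in lines:
--         if not line.startswith("HETATM"):
--             continue
--         if "HOH" in line or "WAT" in line:
--             continue
--         code = line[17:20].strip()
--         if not code:
--             continue
--         rec = (line[21:22].strip(), line[22:26].strip(), line[12:16].strip())
--         groups.setdefault(code, []).append(rec)
--
--     het_details = {}
--     for code, recs in groups.items():
--         chains, res_nums, atom_names = set(), set(), set()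
--         for chain, res_num, atom_name in recs:
--             if chain:
--                 chains.add(chain)
--             if res_num:
--                 res_nums.add(res_num)
--             if atom_name:
--                 atom_names.add(atom_name)
--         het_details[code] = {'chains': chains,
--                              'residue_numbers': res_nums,
--                              'atom_names': atom_names}
--
--     return sorted(groups), het_details
-- ===== Notes on version B (the rewrite author's own statement) =====
-- stated objective: alternative
-- what changed: A interleaves first-seen/update set accumulation inside one loop over HETATM lines; B first builds an index grouping parsed (chain, res_num, atom_name) records by code, then aggregates each group's three field sets in a second pass.
import Mathlib
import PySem

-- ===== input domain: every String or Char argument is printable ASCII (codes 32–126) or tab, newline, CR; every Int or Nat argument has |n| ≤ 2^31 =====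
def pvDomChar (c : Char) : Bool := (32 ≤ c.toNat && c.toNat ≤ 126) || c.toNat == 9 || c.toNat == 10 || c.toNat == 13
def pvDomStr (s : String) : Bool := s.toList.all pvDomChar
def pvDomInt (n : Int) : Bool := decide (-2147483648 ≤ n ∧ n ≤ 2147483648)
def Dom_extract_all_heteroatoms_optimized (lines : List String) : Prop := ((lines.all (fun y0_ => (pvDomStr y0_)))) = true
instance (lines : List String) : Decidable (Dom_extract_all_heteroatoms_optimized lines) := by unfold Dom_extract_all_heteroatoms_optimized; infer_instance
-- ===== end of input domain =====

-- B regroups A's single accumulation loop into two passes: first build an index of parsed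
-- records grouped by code, then aggregate each group's field sets (objective: alternative
-- decomposition, same asymptotic cost).
-- Shared field-extraction helpers (both Pythons compute these same slice/strip expressions):
def pvSkipLine (line : String) : Bool :=
  PySem.Str.isIn "HOH" line || PySem.Str.isIn "WAT" line
def pvCode (line : String) : String := PySem.Str.strip (PySem.Str.slice line (some 17) (some 20))
def pvChain (line : String) : String := PySem.Str.strip (PySem.Str.slice line (some 21) (some 22))
def pvResNum (line : String) : String := PySem.Str.strip (PySem.Str.slice line (some 22) (some 26))
def pvAtomName (line : String) : String := PySem.Str.strip (PySem.Str.slice line (some 12) (some 16))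

-- ===== PORT A =====
-- het_details[code][field].add(v), guarded as A does with 'if field:' (empty field adds nothing)
def pvAddField (d : List (String × List String)) (key v : String) : List (String × List String) :=
  if v = "" then d else d.map (fun p => if p.1 = key then (p.1, PySem.Set.add p.2 v) else p)

def pvAddFields (d : List (String × List String)) (r : String × String × String) : List (String × List String) :=
  pvAddField (pvAddField (pvAddField d "chains" r.1) "residue_numbers" r.2.1) "atom_names" r.2.2

-- A's fresh entry: singleton set per non-empty field, else the empty set
def pvFresh (r : String × String × String) : List (String × List String) :=
  [("chains", if r.1 = "" then [] else [r.1]),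
   ("residue_numbers", if r.2.1 = "" then [] else [r.2.1]),
   ("atom_names", if r.2.2 = "" then [] else [r.2.2])]

-- loop body of A over hetatm_lines, state = (hets, het_details)
def pvStepA (st : PySem.Set String × PySem.Dict String (List (String × List String))) (line : String) :
    PySem.Set String × PySem.Dict String (List (String × List String)) :=
  if pvSkipLine line = true then st
  else if pvCode line = "" then st
  else (PySem.Set.add st.1 (pvCode line),
        if st.2.contains (pvCode line) = true then
          st.2.modify (pvCode line) []
            (fun d => pvAddFields d (pvChain line, pvResNum line, pvAtomName line))
        else st.2.insert (pvCode line) (pvFresh (pvChain line, pvResNum line, pvAtomName line)))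

def pvRunA (lines : List String) : PySem.Set String × PySem.Dict String (List (String × List String)) :=
  (lines.filter (fun l => PySem.Str.startswith l "HETATM")).foldl pvStepA
    (PySem.Set.empty, PySem.Dict.empty)

def extract_all_heteroatoms_optimized (lines : List String) : List String × (List (String × List (String × List String))) :=
  (PySem.List.sorted (pvRunA lines).1 (fun x => x) false, (pvRunA lines).2.items)

-- ===== PORT B =====
-- first pass (loop body): parse a qualifying line and append its record to its code's group
def pvInnerB (g : PySem.Dict String (List (String × String × String))) (line : String) :
    PySem.Dict String (List (String × String × String)) :=
  if pvSkipLine line = true then g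
  else if pvCode line = "" then g
  else g.modify (pvCode line) []
        (fun recs => recs ++ [(pvChain line, pvResNum line, pvAtomName line)])

def pvStepB (g : PySem.Dict String (List (String × String × String))) (line : String) :
    PySem.Dict String (List (String × String × String)) :=
  if PySem.Str.startswith line "HETATM" then pvInnerB g line else g

def pvGroups (lines : List String) : PySem.Dict String (List (String × String × String)) :=
  lines.foldl pvStepB PySem.Dict.empty

-- second pass: aggregate one group's records into the three field sets
def pvTriStep (acc : PySem.Set String × PySem.Set String × PySem.Set String)
    (r : String × String × String) : PySem.Set String × PySem.Set String × PySem.Set String :=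
  ((if r.1 = "" then acc.1 else PySem.Set.add acc.1 r.1),
   (if r.2.1 = "" then acc.2.1 else PySem.Set.add acc.2.1 r.2.1),
   (if r.2.2 = "" then acc.2.2 else PySem.Set.add acc.2.2 r.2.2))

def pvAggB (recs : List (String × String × String)) : List (String × List String) :=
  [("chains", (recs.foldl pvTriStep (PySem.Set.empty, PySem.Set.empty, PySem.Set.empty)).1),
   ("residue_numbers", (recs.foldl pvTriStep (PySem.Set.empty, PySem.Set.empty, PySem.Set.empty)).2.1),
   ("atom_names", (recs.foldl pvTriStep (PySem.Set.empty, PySem.Set.empty, PySem.Set.empty)).2.2)]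

def extract_all_heteroatoms_optimized_alt (lines : List String) : List String × (List (String × List (String × List String))) :=
  (PySem.List.sorted (pvGroups lines).keys (fun x => x) false,
   (pvGroups lines).items.map (fun p => (p.1, pvAggB p.2)))

-- ===== PRECONDITION & SPEC =====
def Spec_extract_all_heteroatoms_optimized (lines : List String) (out : List String × (List (String × List (String × List String)))) : Prop := out = extract_all_heteroatoms_optimized_alt lines
instance (lines : List String) (out : List String × (List (String × List (String × List String)))) : Decidable (Spec_extract_all_heteroatoms_optimized lines out) := by unfold Spec_extract_all_heteroatoms_optimized; infer_instance

-- ===== CLAIM (what is proved, stated in full; the proofs are below) =====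
def Claim_equal_extract_all_heteroatoms_optimized : Prop := ∀ (lines : List String), Dom_extract_all_heteroatoms_optimized lines → Spec_extract_all_heteroatoms_optimized lines (extract_all_heteroatoms_optimized lines)

-- ===== LEMMAS AND PROOFS =====

-- A's incremental aggregation of one group, expressed as a fold over the group's records
def pvAggA (recs : List (String × String × String)) : List (String × List String) :=
  recs.foldl pvAddFields [("chains", []), ("residue_numbers", []), ("atom_names", [])]

-- A's detail dict, reconstructed from B's grouping dict
def pvMapAgg (g : PySem.Dict String (List (String × String × String))) :
    PySem.Dict String (List (String × List String)) :=
  PySem.Dict.mk (g.items.map (fun p => (p.1, pvAggA p.2)))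

lemma pvAddFields_wrap (t : PySem.Set String × PySem.Set String × PySem.Set String)
    (r : String × String × String) :
    pvAddFields [("chains", t.1), ("residue_numbers", t.2.1), ("atom_names", t.2.2)] r =
      [("chains", (pvTriStep t r).1), ("residue_numbers", (pvTriStep t r).2.1),
       ("atom_names", (pvTriStep t r).2.2)] := by
  simp [pvAddFields, pvAddField, pvTriStep]
  split_ifs <;> simp

lemma pvAggA_eq_wrap (recs : List (String × String × String))
    (t : PySem.Set String × PySem.Set String × PySem.Set String) :
    recs.foldl pvAddFields [("chains", t.1), ("residue_numbers", t.2.1), ("atom_names", t.2.2)] =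
      [("chains", (recs.foldl pvTriStep t).1), ("residue_numbers", (recs.foldl pvTriStep t).2.1),
       ("atom_names", (recs.foldl pvTriStep t).2.2)] := by
  induction recs generalizing t with
  | nil => simp
  | cons r rest ih => simp only [List.foldl_cons, pvAddFields_wrap, ih]

lemma pvAggA_eq_pvAggB (recs : List (String × String × String)) : pvAggA recs = pvAggB recs := by
  simpa [pvAggA, pvAggB, PySem.Set.empty] using pvAggA_eq_wrap recs ([], [], [])

lemma pvFresh_eq (r : String × String × String) : pvFresh r = pvAggA [r] := by
  simp [pvFresh, pvAggA, pvAddFields, pvAddField, PySem.Set.add, PySem.Set.contains]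
  split_ifs <;> simp

lemma pvAggA_append (l : List (String × String × String)) (r : String × String × String) :
    pvAggA (l ++ [r]) = pvAddFields (pvAggA l) r := by
  simp [pvAggA, List.foldl_append]

lemma keys_pvMapAgg (g : PySem.Dict String (List (String × String × String))) :
    (pvMapAgg g).keys = g.keys := by
  simp [pvMapAgg, PySem.Dict.keys]

lemma contains_pvMapAgg (g : PySem.Dict String (List (String × String × String))) (c : String) :
    (pvMapAgg g).contains c = g.contains c := by
  simp [pvMapAgg, PySem.Dict.contains, List.any_map, Function.comp_def]

lemma pvFoldB_filter (lines : List String) (d : PySem.Dict String (List (String × String × String))) :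
    lines.foldl pvStepB d =
      (lines.filter (fun l => PySem.Str.startswith l "HETATM")).foldl pvInnerB d := by
  rw [show pvStepB = (fun g line => if PySem.Str.startswith line "HETATM" then pvInnerB g line else g) from rfl,
    PySem.List.foldl_if_eq_foldl_filter]

lemma pvStep_one (g : PySem.Dict String (List (String × String × String))) (line : String)
    (hn : g.keys.Nodup) :
    pvStepA (g.keys, pvMapAgg g) line = ((pvInnerB g line).keys, pvMapAgg (pvInnerB g line)) := by
  unfold pvStepA pvInnerB
  by_cases hs : pvSkipLine line = true
  · simp only [if_pos hs]
  · simp only [if_neg hs]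
    by_cases h0 : pvCode line = ""
    · simp only [if_pos h0]
    · simp only [if_neg h0]
      set c := pvCode line with hcdef
      set r : String × String × String := (pvChain line, pvResNum line, pvAtomName line) with hrdef
      simp only [PySem.Dict.modify, contains_pvMapAgg]
      by_cases hc : g.contains c = true
      · simp only [if_pos hc]
        refine Prod.ext ?_ ?_
        · have hmem : c ∈ g.keys := (PySem.Dict.contains_iff_mem_keys g c).mp hc
          simp [PySem.Dict.keys_insert_of_contains g _ hc, PySem.Set.add, PySem.Set.contains, hmem]
        · show (pvMapAgg g).insert c _ = pvMapAgg (g.insert c _)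
          apply PySem.Dict.ext
          rw [PySem.Dict.items_insert_of_contains _ _ ((contains_pvMapAgg g c).trans hc)]
          simp only [pvMapAgg]
          rw [PySem.Dict.items_insert_of_contains _ _ hc]
          show List.map _ (List.map _ g.items) = List.map _ (List.map _ g.items)
          rw [List.map_map, List.map_map]
          refine List.map_congr_left (fun p hp => ?_)
          by_cases hpc : p.1 = c
          · have hp' : (c, p.2) ∈ g.items := by rwa [← hpc]
            have hg1 : g.getD c [] = p.2 := PySem.Dict.getD_of_mem_items g hp' hn []
            have hp2 : (c, pvAggA p.2) ∈ (pvMapAgg g).items :=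
              List.mem_map.mpr ⟨(c, p.2), hp', rfl⟩
            have hn2 : (pvMapAgg g).keys.Nodup := by rw [keys_pvMapAgg]; exact hn
            have hg2 : (pvMapAgg g).getD c [] = pvAggA p.2 :=
              PySem.Dict.getD_of_mem_items _ hp2 hn2 []
            have hg2' : (PySem.Dict.mk (List.map (fun p => (p.1, pvAggA p.2)) g.items)).getD c []
                = pvAggA p.2 := hg2
            simp [hpc, hg1, hg2', pvAggA_append]
          · simp [hpc]
      · have hc' : g.contains c = false := by simpa using hc
        simp only [if_neg hc]
        refine Prod.ext ?_ ?_
        · have hmem : c ∉ g.keys := fun h => hc ((PySem.Dict.contains_iff_mem_keys g c).mpr h)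
          simp [PySem.Dict.keys_insert_of_not_contains g _ hc', PySem.Set.add,
            PySem.Set.contains, hmem]
        · show (pvMapAgg g).insert c _ = pvMapAgg (g.insert c _)
          apply PySem.Dict.ext
          rw [PySem.Dict.items_insert_of_not_contains _ _
              (by rw [contains_pvMapAgg]; exact hc')]
          simp only [pvMapAgg]
          rw [PySem.Dict.items_insert_of_not_contains _ _ hc']
          have hg0 : g.getD c [] = [] := PySem.Dict.getD_of_not_contains g [] hc'
          simp [hg0, pvFresh_eq]

lemma keys_pvInnerB_nodup (g : PySem.Dict String (List (String × String × String))) (line : String)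
    (hn : g.keys.Nodup) : (pvInnerB g line).keys.Nodup := by
  unfold pvInnerB
  by_cases hs : pvSkipLine line = true
  · simpa only [if_pos hs] using hn
  · simp only [if_neg hs]
    by_cases h0 : pvCode line = ""
    · simpa only [if_pos h0] using hn
    · simp only [if_neg h0, PySem.Dict.modify]
      by_cases hc : g.contains (pvCode line) = true
      · rw [PySem.Dict.keys_insert_of_contains g _ hc]; exact hn
      · have hc' : g.contains (pvCode line) = false := by simpa using hc
        rw [PySem.Dict.keys_insert_of_not_contains g _ hc']
        have hmem : pvCode line ∉ g.keys := fun h =>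
          hc ((PySem.Dict.contains_iff_mem_keys g _).mpr h)
        rw [List.nodup_append]
        refine ⟨hn, List.nodup_singleton _, fun a ha b hb => ?_⟩
        simp only [List.mem_singleton] at hb
        exact fun he => hmem ((he.trans hb) ▸ ha)

lemma pvMain (ls : List String) (g : PySem.Dict String (List (String × String × String)))
    (hn : g.keys.Nodup) :
    ls.foldl pvStepA (g.keys, pvMapAgg g) =
      ((ls.foldl pvInnerB g).keys, pvMapAgg (ls.foldl pvInnerB g)) := by
  induction ls generalizing g with
  | nil => rfl
  | cons l rest ih =>
      simp only [List.foldl_cons, pvStep_one g l hn]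
      exact ih _ (keys_pvInnerB_nodup g l hn)

lemma pvRunA_eq (lines : List String) :
    pvRunA lines = ((pvGroups lines).keys, pvMapAgg (pvGroups lines)) := by
  unfold pvRunA pvGroups
  rw [pvFoldB_filter]
  have h0 : ((PySem.Set.empty : PySem.Set String),
      (PySem.Dict.empty : PySem.Dict String (List (String × List String)))) =
      ((PySem.Dict.empty : PySem.Dict String (List (String × String × String))).keys,
        pvMapAgg PySem.Dict.empty) := rfl
  rw [h0, pvMain _ _ (by simp [PySem.Dict.keys, PySem.Dict.empty])]

-- ===== VERDICT (by name: the statement is the Claim_ definition above) =====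
theorem extract_all_heteroatoms_optimized_spec : Claim_equal_extract_all_heteroatoms_optimized := by
  intro lines _
  unfold Spec_extract_all_heteroatoms_optimized extract_all_heteroatoms_optimized
    extract_all_heteroatoms_optimized_alt
  rw [pvRunA_eq]
  refine Prod.ext (by rfl) ?_
  show (pvMapAgg (pvGroups lines)).items = _
  simp only [pvMapAgg]
  exact List.map_congr_left (fun p _ => by rw [pvAggA_eq_pvAggB])
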